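-- pv_equiv track=rewrite | github.com/gyorgy-ruzicska/advent_of_code | Advent_of_code.py | update_adapter_chain
-- ===== SOURCE A (Python) =====
-- def update_adapter_chain(dict_of_chains, adapters, my_device):
--     new_dict_of_chains={}
--     updated=False
--     for key, value in dict_of_chains.items():
--         for i in range(1,4):
--             new_number=key+i
--             if new_number in adapters:
--                 if new_number in new_dict_of_chains.keys():
--                     existing_lenght=new_dict_of_chains[new_number]
--                     new_dict_of_chains[new_number]=existing_lenght+value
--                 else:
--                     new_dict_of_chains[new_number]=value
--                 updated=True
--         if key==my_device:
--             if key in new_dict_of_chains.keys():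
--                 existing_lenght=new_dict_of_chains[key]
--                 new_dict_of_chains[key]=existing_lenght+value
--             else:
--                 new_dict_of_chains[key]=value
--     return new_dict_of_chains, updated
-- ===== SOURCE B (Python) =====
-- def update_adapter_chain(dict_of_chains, adapters, my_device):
--     adapter_set = set(adapters)
--     events = []
--     for k, v in dict_of_chains.items():
--         hits = [(k + i, v) for i in (1, 2, 3) if k + i in adapter_set]
--         events.append((hits, (k, v) if k == my_device else None))
--     updated = any(hits for hits, _ in events)
--     new_dict = {}
--     for hits, self_ev in events:
--         for t, v in hits:
--             new_dict[t] = new_dict.get(t, 0) + v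
--         if self_ev is not None:
--             t, v = self_ev
--             new_dict[t] = new_dict.get(t, 0) + v
--     return new_dict, updated
-- ===== Notes on version B (the rewrite author's own statement) =====
-- stated objective: alternative
-- what changed: B separates the work into phases: it precomputes a set of adapters and, per source key, the list of successor 'hit' events plus an optional self-copy event, derives the updated flag once from the event stream, and then folds the events into the new dict with a single uniform get-add-insert accumulator, instead of A's interleaved scatter loop with contains/else branching and flag mutation.
import Mathlib
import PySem

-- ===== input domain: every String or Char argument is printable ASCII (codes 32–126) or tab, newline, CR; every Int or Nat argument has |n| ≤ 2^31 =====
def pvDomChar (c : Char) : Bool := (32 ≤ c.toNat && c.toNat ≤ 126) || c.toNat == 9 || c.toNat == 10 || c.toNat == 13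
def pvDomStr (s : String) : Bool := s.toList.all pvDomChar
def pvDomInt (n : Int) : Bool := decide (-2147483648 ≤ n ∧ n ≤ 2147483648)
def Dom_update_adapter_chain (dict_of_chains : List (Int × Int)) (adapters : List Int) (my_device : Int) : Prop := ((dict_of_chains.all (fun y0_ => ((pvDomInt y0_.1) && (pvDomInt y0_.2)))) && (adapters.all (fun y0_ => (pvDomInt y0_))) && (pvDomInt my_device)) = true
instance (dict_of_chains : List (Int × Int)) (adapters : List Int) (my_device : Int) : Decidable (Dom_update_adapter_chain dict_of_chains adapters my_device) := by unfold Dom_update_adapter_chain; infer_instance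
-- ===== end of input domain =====

-- B rephrases A's interleaved scatter loop as phases: build an event stream (successor hits per key + optional
-- self-copy), read the updated flag off the stream, then fold the events with one uniform get-add-insert accumulator.

-- ===== PORT A =====
-- inner 'for i in range(1,4)' loop of A
def uacInner (adapters : List Int) (key value : Int) (st : PySem.Dict Int Int × Bool) : PySem.Dict Int Int × Bool :=
  (PySem.List.pyRange 1 4 1).foldl (fun st i =>
    let nn := key + i
    if nn ∈ adapters then
      if st.1.contains nn then (st.1.insert nn (st.1.getD nn 0 + value), true)
      else (st.1.insert nn value, true)
    else st) st

-- one iteration of A's outer 'for key, value in dict_of_chains.items()' loop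
def uacStep (adapters : List Int) (my_device : Int) (st : PySem.Dict Int Int × Bool) (kv : Int × Int) : PySem.Dict Int Int × Bool :=
  let st1 := uacInner adapters kv.1 kv.2 st
  if kv.1 = my_device then
    (if st1.1.contains kv.1 then st1.1.insert kv.1 (st1.1.getD kv.1 0 + kv.2)
     else st1.1.insert kv.1 kv.2, st1.2)
  else st1

def update_adapter_chain (dict_of_chains : List (Int × Int)) (adapters : List Int) (my_device : Int) : (List (Int × Int)) × Bool :=
  let r := dict_of_chains.foldl (uacStep adapters my_device) (PySem.Dict.empty, false)
  (r.1.items, r.2)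

-- ===== PORT B =====
-- hits: [(k + i, v) for i in (1, 2, 3) if k + i in adapter_set]
def uacHits (aset : PySem.Set Int) (k v : Int) : List (Int × Int) :=
  (([1, 2, 3] : List Int).filter (fun i => decide (k + i ∈ aset))).map (fun i => (k + i, v))

-- new_dict[t] = new_dict.get(t, 0) + v
def uacAdd (nd : PySem.Dict Int Int) (tv : Int × Int) : PySem.Dict Int Int :=
  nd.insert tv.1 (nd.getD tv.1 0 + tv.2)

-- body of B's second loop: apply one event (hits, self_ev)
def uacApply (nd : PySem.Dict Int Int) (e : List (Int × Int) × Option (Int × Int)) : PySem.Dict Int Int :=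
  let nd2 := e.1.foldl uacAdd nd
  match e.2 with
  | some tv => uacAdd nd2 tv
  | none => nd2

-- one event per source key: (hits, optional self-copy)
def uacEvent (aset : PySem.Set Int) (my_device : Int) (kv : Int × Int) : List (Int × Int) × Option (Int × Int) :=
  (uacHits aset kv.1 kv.2, if kv.1 = my_device then some (kv.1, kv.2) else none)

def update_adapter_chain_alt (dict_of_chains : List (Int × Int)) (adapters : List Int) (my_device : Int) : (List (Int × Int)) × Bool :=
  let aset := PySem.Set.ofList adapters
  let events := dict_of_chains.map (uacEvent aset my_device)
  let updated := events.any (fun e => !e.1.isEmpty)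
  ((events.foldl uacApply PySem.Dict.empty).items, updated)

-- ===== PRECONDITION & SPEC =====
def Spec_update_adapter_chain (dict_of_chains : List (Int × Int)) (adapters : List Int) (my_device : Int) (out : (List (Int × Int)) × Bool) : Prop := out = update_adapter_chain_alt dict_of_chains adapters my_device
instance (dict_of_chains : List (Int × Int)) (adapters : List Int) (my_device : Int) (out : (List (Int × Int)) × Bool) : Decidable (Spec_update_adapter_chain dict_of_chains adapters my_device out) := by unfold Spec_update_adapter_chain; infer_instance

-- ===== CLAIM (what is proved, stated in full; the proofs are below) =====
def Claim_equal_update_adapter_chain : Prop := ∀ (dict_of_chains : List (Int × Int)) (adapters : List Int) (my_device : Int), Dom_update_adapter_chain dict_of_chains adapters my_device → Spec_update_adapter_chain dict_of_chains adapters my_device (update_adapter_chain dict_of_chains adapters my_device)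

-- ===== LEMMAS AND PROOFS =====

-- A's if-contains-then-add-else-set branching is B's single get-add-insert accumulator.
lemma uac_branch_eq (d : PySem.Dict Int Int) (k v : Int) :
    (if d.contains k then d.insert k (d.getD k 0 + v) else d.insert k v) = uacAdd d (k, v) := by
  by_cases h : d.contains k = true
  · simp [uacAdd, h]
  · simp only [Bool.not_eq_true] at h
    simp [uacAdd, h, PySem.Dict.getD_of_not_contains d 0 h]

-- the inner scatter loop over ANY index list = fold of the filtered-hit events, flag ORed with "some hit"
lemma uac_inner_general (adapters : List Int) (k v : Int) (is : List Int) (st : PySem.Dict Int Int × Bool) :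
    is.foldl (fun st i =>
      let nn := k + i
      if nn ∈ adapters then
        if st.1.contains nn then (st.1.insert nn (st.1.getD nn 0 + v), true)
        else (st.1.insert nn v, true)
      else st) st
    = (((is.filter (fun i => decide (k + i ∈ adapters))).map (fun i => (k + i, v))).foldl uacAdd st.1,
       st.2 || !((is.filter (fun i => decide (k + i ∈ adapters))).isEmpty)) := by
  induction is generalizing st with
  | nil => simp
  | cons i rest ih =>
      simp only [List.foldl_cons, List.filter_cons]
      by_cases h : k + i ∈ adapters
      · have hb : (if st.1.contains (k + i) = true then
              (st.1.insert (k + i) (st.1.getD (k + i) 0 + v), true)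
            else (st.1.insert (k + i) v, true))
            = (uacAdd st.1 (k + i, v), true) := by
          rw [← uac_branch_eq st.1 (k + i) v]; split <;> rfl
        simp [h, hb, ih]
      · simp [h, ih]

-- one outer iteration of A = apply the key's event to the dict and OR in its hit flag
lemma uac_step_eq (adapters : List Int) (my_device : Int) (st : PySem.Dict Int Int × Bool) (kv : Int × Int) :
    uacStep adapters my_device st kv
      = (uacApply st.1 (uacEvent (PySem.Set.ofList adapters) my_device kv),
         st.2 || !(uacHits (PySem.Set.ofList adapters) kv.1 kv.2).isEmpty) := by
  obtain ⟨k, v⟩ := kv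
  have hr : PySem.List.pyRange 1 4 1 = [1, 2, 3] := by decide
  have hhits : uacHits (PySem.Set.ofList adapters) k v
      = (([1, 2, 3] : List Int).filter (fun i => decide (k + i ∈ adapters))).map (fun i => (k + i, v)) := by
    simp [uacHits, PySem.Set.mem_ofList]
  have hflag : (([1, 2, 3] : List Int).filter (fun i => decide (k + i ∈ adapters))).isEmpty
      = (uacHits (PySem.Set.ofList adapters) k v).isEmpty := by
    rw [hhits]; simp
  rw [uacStep, uacInner, hr, uac_inner_general adapters k v [1, 2, 3] st, ← hhits, hflag]
  by_cases hm : k = my_device <;>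
    simp [uacApply, uacEvent, hm, uac_branch_eq]

-- A's whole fold = B's event fold with the flag accumulated by 'any', for every start state
lemma uac_fold_eq (adapters : List Int) (my_device : Int) (d : List (Int × Int)) (st : PySem.Dict Int Int × Bool) :
    d.foldl (uacStep adapters my_device) st
      = ((d.map (uacEvent (PySem.Set.ofList adapters) my_device)).foldl uacApply st.1,
         st.2 || (d.map (uacEvent (PySem.Set.ofList adapters) my_device)).any (fun e => !e.1.isEmpty)) := by
  induction d generalizing st with
  | nil => simp
  | cons kv rest ih =>
      simp only [List.foldl_cons, List.map_cons, List.any_cons]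
      rw [uac_step_eq, ih]
      simp [uacEvent, Bool.or_assoc]

-- ===== VERDICT (by name: the statement is the Claim_ definition above) =====
theorem update_adapter_chain_spec : Claim_equal_update_adapter_chain := by
  intro d adapters my_device _
  unfold Spec_update_adapter_chain update_adapter_chain update_adapter_chain_alt
  rw [uac_fold_eq]
  simp
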